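-- pv_equiv track=rewrite | github.com/rokcej/advent-of-code-2018 | 2023/day14/part2.py | encode_platform
-- ===== SOURCE A (Python) =====
-- def encode_platform(platform):
-- 	encoding = []
-- 	for row in platform:
-- 		contiguous_groups = []
-- 		offset = 0
-- 		while offset < len(row):
-- 			size = 0
-- 			while offset + size < len(row) and row[offset + size] == "O":
-- 				size += 1
-- 			if size > 0:
-- 				contiguous_groups.append((offset, size))
-- 			offset += size + 1
-- 		encoding.append(tuple(contiguous_groups))
-- 	return tuple(encoding)
-- ===== SOURCE B (Python) =====
-- def _encode_row(row):
--     groups = []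
--     start = None
--     for i, ch in enumerate(row):
--         if ch == "O":
--             if start is None:
--                 start = i
--         elif start is not None:
--             groups.append((start, i - start))
--             start = None
--     if start is not None:
--         groups.append((start, len(row) - start))
--     return tuple(groups)
--
--
-- def encode_platform(platform):
--     return tuple(_encode_row(row) for row in platform)
-- ===== Notes on version B (the rewrite author's own statement) =====
-- stated objective: simpler
-- what changed: Replaces A's nested while loops with explicit index-jump arithmetic (offset += size + 1) by a single flat pass over enumerate(row) that tracks an optional run-start and emits a group when a run ends.
import Mathlib
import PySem

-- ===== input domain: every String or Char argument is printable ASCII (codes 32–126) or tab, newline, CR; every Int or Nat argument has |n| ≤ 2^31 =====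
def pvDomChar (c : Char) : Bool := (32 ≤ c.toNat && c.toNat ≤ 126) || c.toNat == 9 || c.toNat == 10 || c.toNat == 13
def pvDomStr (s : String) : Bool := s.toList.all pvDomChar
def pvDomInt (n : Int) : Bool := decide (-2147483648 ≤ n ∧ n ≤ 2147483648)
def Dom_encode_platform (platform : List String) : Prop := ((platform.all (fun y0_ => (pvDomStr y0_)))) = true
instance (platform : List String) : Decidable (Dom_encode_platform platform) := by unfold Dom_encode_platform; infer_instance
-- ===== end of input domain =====

-- B replaces A's nested whiles with index jumps by one flat pass tracking an optional run start (simpler).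

-- B replaces A's nested whiles with index jumps by one flat pass tracking an optional run start (simpler).

-- ===== PORT A =====
-- inner while: size of the run of 'O' starting at position i (size += 1 steps)
def countO (cs : List Char) (i : Nat) : Nat :=
  if h : i < cs.length then
    if cs[i] = 'O' then countO cs (i + 1) + 1 else 0
  else 0
termination_by cs.length - i
decreasing_by exact Nat.sub_succ_lt_self _ _ h

-- outer while: offset jumps by size + 1, appending (offset, size) when size > 0
def rowLoopA (cs : List Char) (offset : Nat) (acc : List (Int × Int)) : List (Int × Int) :=
  if _h : offset < cs.length then
    rowLoopA cs (offset + countO cs offset + 1)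
      (if countO cs offset > 0 then acc ++ [((offset : Int), (countO cs offset : Int))] else acc)
  else acc
termination_by cs.length - offset
decreasing_by exact Nat.sub_lt_sub_left _h (Nat.lt_succ_of_le (Nat.le_add_right _ _))

def encode_platform (platform : List String) : List (List (Int × Int)) :=
  platform.foldl (fun enc row => enc ++ [rowLoopA row.toList 0 []]) []

-- ===== PORT B =====
-- for i, ch in enumerate(row): i is the running index; st is the optional run start;
-- at the end of the string i = len(row), so the final flush uses i - s (= len(row) - start)
def rowBGo (cs : List Char) (i : Nat) (gs : List (Int × Int)) (st : Option Nat) : List (Int × Int) :=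
  match cs with
  | [] =>
    match st with
    | none => gs
    | some s => gs ++ [((s : Int), (i : Int) - (s : Int))]
  | c :: rest =>
    if c = 'O' then
      match st with
      | none => rowBGo rest (i + 1) gs (some i)
      | some _ => rowBGo rest (i + 1) gs st
    else
      match st with
      | none => rowBGo rest (i + 1) gs none
      | some s => rowBGo rest (i + 1) (gs ++ [((s : Int), (i : Int) - (s : Int))]) none

def encode_platform_alt (platform : List String) : List (List (Int × Int)) :=
  platform.map (fun row => rowBGo row.toList 0 [] none)

-- ===== PRECONDITION & SPEC =====
def Spec_encode_platform (platform : List String) (out : List (List (Int × Int))) : Prop := out = encode_platform_alt platform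
instance (platform : List String) (out : List (List (Int × Int))) : Decidable (Spec_encode_platform platform out) := by unfold Spec_encode_platform; infer_instance

-- ===== CLAIM (what is proved, stated in full; the proofs are below) =====
def Claim_equal_encode_platform : Prop := ∀ (platform : List String), Dom_encode_platform platform → Spec_encode_platform platform (encode_platform platform)

-- ===== LEMMAS AND PROOFS =====

-- length of the leading run of 'O'
def leadO : List Char → Nat
  | [] => 0
  | c :: r => if c = 'O' then leadO r + 1 else 0

-- common description of one encoded row
def gRuns : List Char → Nat → List (Int × Int)
  | [], _ => []
  | c :: rest, off =>
    if c = 'O' then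
      ((off : Int), ((leadO rest + 1 : Nat) : Int)) :: gRuns (rest.drop (leadO rest + 1)) (off + leadO rest + 2)
    else
      gRuns rest (off + 1)
termination_by l _ => l.length
decreasing_by
  · simp
  · simp

lemma countO_eq_aux (n : Nat) : ∀ (cs : List Char) (i : Nat), cs.length - i ≤ n →
    countO cs i = leadO (cs.drop i) := by
  induction n with
  | zero =>
    intro cs i h
    rw [countO, dif_neg (by omega), List.drop_eq_nil_iff.mpr (by omega)]
    simp [leadO]
  | succ n ih =>
    intro cs i h
    by_cases hlt : i < cs.length
    · rw [countO, dif_pos hlt, List.drop_eq_getElem_cons hlt]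
      by_cases hO : cs[i] = 'O'
      · rw [if_pos hO, ih cs (i + 1) (by omega)]
        simp [leadO, hO]
      · rw [if_neg hO]
        simp [leadO, hO]
    · rw [countO, dif_neg hlt, List.drop_eq_nil_iff.mpr (by omega)]
      simp [leadO]

lemma countO_eq (cs : List Char) (i : Nat) : countO cs i = leadO (cs.drop i) :=
  countO_eq_aux cs.length cs i (by omega)

lemma rowLoopA_eq_aux (n : Nat) : ∀ (cs : List Char) (off : Nat) (acc : List (Int × Int)),
    cs.length - off ≤ n → rowLoopA cs off acc = acc ++ gRuns (cs.drop off) off := by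
  induction n with
  | zero =>
    intro cs off acc h
    rw [rowLoopA, dif_neg (by omega), List.drop_eq_nil_iff.mpr (by omega)]
    simp [gRuns]
  | succ n ih =>
    intro cs off acc h
    by_cases hlt : off < cs.length
    · rw [rowLoopA, dif_pos hlt]
      by_cases hO : cs[off] = 'O'
      · have hk : countO cs off = leadO (cs.drop (off + 1)) + 1 := by
          rw [countO_eq, List.drop_eq_getElem_cons hlt]
          simp [leadO, hO]
        rw [hk, if_pos (by omega)]
        rw [ih cs (off + (leadO (cs.drop (off + 1)) + 1) + 1) _ (by omega)]
        rw [List.drop_eq_getElem_cons hlt]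
        simp only [gRuns, if_pos hO]
        have hd : (cs.drop (off + 1)).drop (leadO (cs.drop (off + 1)) + 1)
            = cs.drop (off + (leadO (cs.drop (off + 1)) + 1) + 1) := by
          rw [List.drop_drop]
          congr 1
          omega
        have hi : off + leadO (cs.drop (off + 1)) + 2
            = off + (leadO (cs.drop (off + 1)) + 1) + 1 := by omega
        rw [hd, hi]
        simp
      · have hk : countO cs off = 0 := by
          rw [countO_eq, List.drop_eq_getElem_cons hlt]
          simp [leadO, hO]
        rw [hk]
        norm_num
        rw [ih cs (off + 1) acc (by omega), List.drop_eq_getElem_cons hlt]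
        simp only [gRuns, if_neg hO]
    · rw [rowLoopA, dif_neg hlt, List.drop_eq_nil_iff.mpr (by omega)]
      simp [gRuns]

lemma rowLoopA_eq (cs : List Char) (off : Nat) (acc : List (Int × Int)) :
    rowLoopA cs off acc = acc ++ gRuns (cs.drop off) off :=
  rowLoopA_eq_aux cs.length cs off acc (by omega)

lemma rowBGo_eq (cs : List Char) : ∀ (i : Nat) (acc : List (Int × Int)),
    rowBGo cs i acc none = acc ++ gRuns cs i ∧
    ∀ s : Nat, rowBGo cs i acc (some s) =
      acc ++ (((s : Int), (i : Int) - (s : Int) + (leadO cs : Int)) ::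
        gRuns (cs.drop (leadO cs + 1)) (i + leadO cs + 1)) := by
  induction cs with
  | nil =>
    intro i acc
    refine ⟨by simp [rowBGo, gRuns], fun s => ?_⟩
    simp [rowBGo, gRuns, leadO]
  | cons c rest ih =>
    intro i acc
    by_cases hc : c = 'O'
    · constructor
      · show rowBGo (c :: rest) i acc none = _
        simp only [rowBGo, if_pos hc]
        rw [(ih (i + 1) acc).2 i]
        simp only [gRuns, if_pos hc]
        have h1 : ((i + 1 : Nat) : Int) - (i : Nat) + ((leadO rest : Nat) : Int)
            = ((leadO rest + 1 : Nat) : Int) := by push_cast; ring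
        have h2 : i + 1 + leadO rest + 1 = i + leadO rest + 2 := by omega
        rw [h1, h2]
      · intro s
        show rowBGo (c :: rest) i acc (some s) = _
        simp only [rowBGo, if_pos hc]
        rw [(ih (i + 1) acc).2 s]
        simp only [leadO, if_pos hc, List.drop_succ_cons]
        have h1 : ((i + 1 : Nat) : Int) - (s : Nat) + ((leadO rest : Nat) : Int)
            = ((i : Nat) : Int) - (s : Nat) + ((leadO rest + 1 : Nat) : Int) := by push_cast; ring
        have h2 : i + 1 + leadO rest + 1 = i + (leadO rest + 1) + 1 := by omega
        rw [h1, h2]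
    · constructor
      · show rowBGo (c :: rest) i acc none = _
        simp only [rowBGo, if_neg hc]
        rw [(ih (i + 1) acc).1]
        simp [gRuns, hc]
      · intro s
        show rowBGo (c :: rest) i acc (some s) = _
        simp only [rowBGo, if_neg hc]
        rw [(ih (i + 1) (acc ++ [((s : Int), (i : Int) - (s : Int))])).1]
        simp [leadO, hc]

lemma row_eq (cs : List Char) : rowLoopA cs 0 [] = rowBGo cs 0 [] none := by
  rw [rowLoopA_eq, (rowBGo_eq cs 0 []).1]
  simp

lemma foldl_append_map (f : String → List (Int × Int)) (l : List String) :
    ∀ acc : List (List (Int × Int)),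
      l.foldl (fun enc row => enc ++ [f row]) acc = acc ++ l.map f := by
  induction l with
  | nil => simp [List.foldl]
  | cons x xs ih => intro acc; simp [List.foldl, ih]

-- ===== VERDICT (by name: the statement is the Claim_ definition above) =====
theorem encode_platform_spec : Claim_equal_encode_platform := by
  intro platform _
  unfold Spec_encode_platform encode_platform encode_platform_alt
  rw [foldl_append_map]
  simp only [List.nil_append]
  exact List.map_congr_left (fun row _ => row_eq row.toList)
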